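-- pv_equiv track=rewrite | github.com/ngraczykowski/iris-root | organization-name-agent/company_name/datasources/legal_terms.py | _legal_term_variants
-- ===== SOURCE A (Python) =====
-- import itertools
-- from typing import Any, Dict, List, NamedTuple, Sequence, Set, Tuple
--
-- def _legal_term_variants(term: str) -> Set[str]:
--     return {
--         term,
--         *(
--             " ".join(w).strip()
--             for w in itertools.product(
--                 *[(" ".join(t), "".join(t)) for t in term.split()]
--             )
--         ),
--     }
-- ===== SOURCE B (Python) =====
-- def _decode(words, mask):
--     # peel off the most-significant choice bit: quotient selects the form of the
--     # first word, the remainder encodes the choices for the rest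
--     if not words:
--         return []
--     rest = 1 << (len(words) - 1)
--     q, r = divmod(mask, rest)
--     return [words[0] if q else " ".join(words[0])] + _decode(words[1:], r)
--
--
-- def _legal_term_variants(term):
--     # enumerate the 2^n form-choices as integers and decode each bit pattern
--     words = term.split()
--     return {term, *(" ".join(_decode(words, m)).strip() for m in range(1 << len(words)))}
-- ===== Notes on version B (the rewrite author's own statement) =====
-- stated objective: alternative
-- what changed: Instead of building the Cartesian product of per-word (spaced, joined) pairs with itertools.product, B enumerates the 2^n variants as the integers of range(2^n) and decodes each bit pattern with a recursive divmod helper that peels one choice bit per word.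
import Mathlib
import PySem

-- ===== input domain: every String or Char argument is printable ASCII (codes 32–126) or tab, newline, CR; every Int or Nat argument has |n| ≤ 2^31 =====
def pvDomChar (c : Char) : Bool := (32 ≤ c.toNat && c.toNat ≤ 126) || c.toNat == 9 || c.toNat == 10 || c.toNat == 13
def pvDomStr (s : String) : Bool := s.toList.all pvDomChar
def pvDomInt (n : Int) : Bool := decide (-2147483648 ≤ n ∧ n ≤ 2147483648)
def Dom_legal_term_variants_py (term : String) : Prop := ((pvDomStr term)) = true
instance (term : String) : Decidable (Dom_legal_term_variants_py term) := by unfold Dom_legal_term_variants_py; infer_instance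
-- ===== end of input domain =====

-- B replaces the Cartesian product of per-word (spaced, joined) pairs by an integer
-- enumeration: each of the 2^n variants is the decoding of one bit pattern m in
-- range(2^n), a recursive divmod peeling one choice bit per word (objective: alternative).

-- ===== PORT A =====
-- itertools.product(*lists), ported by hand (exact: lexicographic, last factor fastest)
def pyProduct (ls : List (List String)) : List (List String) :=
  ls.foldl (fun acc xs => acc.flatMap (fun p => xs.map (fun x => p ++ [x]))) [[]]

def legal_term_variants_py (term : String) : List String :=
  let pairs := (PySem.Str.split₀ term).map (fun t =>
    [PySem.Str.join " " (t.toList.map (fun c => String.ofList [c])),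
     PySem.Str.join "" (t.toList.map (fun c => String.ofList [c]))])
  let variants := (pyProduct pairs).map (fun w => PySem.Str.strip (PySem.Str.join " " w))
  PySem.Set.ofList (term :: variants)

-- ===== PORT B =====
-- _decode(words, mask): peel the most-significant choice bit by divmod
def pvDecode : List String → Int → List String
  | [], _ => []
  | w :: ws, mask =>
    let rest : Int := 1 <<< ws.length
    let q := PySem.Int.floordiv mask rest
    let r := PySem.Int.mod mask rest
    ((if q ≠ 0 then w else PySem.Str.join " " (w.toList.map (fun c => String.ofList [c])))
      :: pvDecode ws r)

def legal_term_variants_py_alt (term : String) : List String :=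
  let words := PySem.Str.split₀ term
  PySem.Set.ofList (term ::
    (PySem.List.pyRange 0 ((1 : Int) <<< words.length) 1).map
      (fun m => PySem.Str.strip (PySem.Str.join " " (pvDecode words m))))

-- ===== PRECONDITION & SPEC =====
def Spec_legal_term_variants_py (term : String) (out : List String) : Prop := out = legal_term_variants_py_alt term
instance (term : String) (out : List String) : Decidable (Spec_legal_term_variants_py term out) := by unfold Spec_legal_term_variants_py; infer_instance

-- ===== CLAIM (what is proved, stated in full; the proofs are below) =====
def Claim_equal_legal_term_variants_py : Prop := ∀ (term : String), Dom_legal_term_variants_py term → Spec_legal_term_variants_py term (legal_term_variants_py term)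

-- ===== LEMMAS AND PROOFS =====

-- the spaced form " ".join(w) of a word (proof-side abbreviation)
def pvSpaced (w : String) : String :=
  PySem.Str.join " " (w.toList.map (fun c => String.ofList [c]))

-- "".join(list(w)) = w
theorem pvJoined_eq (w : String) : PySem.Str.join "" (w.toList.map (fun c => String.ofList [c])) = w := by
  apply String.toList_inj.mp
  simp [PySem.Str.toList_join, Function.comp_def, PySem.Chars.join_nil_singletons]

-- recursive form of the product over the per-word pairs
def pvProdR : List String → List (List String)
  | [] => [[]]
  | t :: ws => [pvSpaced t, t].flatMap (fun x => (pvProdR ws).map (x :: ·))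

-- A's foldl-built product, distributed over any accumulator
theorem pvFold_prod (ws : List String) (acc : List (List String)) :
    ws.foldl (fun acc t => acc.flatMap (fun p => [pvSpaced t, t].map (fun x => p ++ [x]))) acc
      = acc.flatMap (fun p => (pvProdR ws).map (p ++ ·)) := by
  induction ws generalizing acc with
  | nil => simp [pvProdR]
  | cons t ws ih =>
    simp only [List.foldl_cons, ih, pvProdR, List.flatMap_assoc]
    congr 1
    funext p
    simp [List.map_map, Function.comp_def, List.append_assoc]

-- the product list IS the list of decodings of the masks 0 .. 2^n - 1
theorem pvProdR_eq_decode (ws : List String) :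
    pvProdR ws = (List.range (2 ^ ws.length)).map (fun k : Nat => pvDecode ws (k : Int)) := by
  induction ws with
  | nil => simp [pvProdR, pvDecode]
  | cons t ws ih =>
    have hpow : ((2 : Nat) ^ (t :: ws).length) = 2 ^ ws.length + 2 ^ ws.length := by
      simp [List.length_cons, pow_succ]; ring
    rw [hpow, List.range_add]
    have hshift : (1 <<< ws.length : Nat) = 2 ^ ws.length := Nat.one_shiftLeft _
    have hd1 : ∀ k : Nat, k < 2 ^ ws.length →
        pvDecode (t :: ws) (k : Int) = pvSpaced t :: pvDecode ws (k : Int) := by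
      intro k hk
      simp only [pvDecode]
      rw [hshift, PySem.Int.floordiv_natCast, PySem.Int.mod_natCast,
        Nat.div_eq_of_lt hk, Nat.mod_eq_of_lt hk]
      simp [pvSpaced]
    have hd2 : ∀ k : Nat, k < 2 ^ ws.length →
        pvDecode (t :: ws) ((2 ^ ws.length + k : Nat) : Int) = t :: pvDecode ws (k : Int) := by
      intro k hk
      have hq : (2 ^ ws.length + k) / 2 ^ ws.length = 1 := by
        rw [Nat.add_div_left _ (Nat.pos_of_ne_zero (by positivity)), Nat.div_eq_of_lt hk]
      have hr : (2 ^ ws.length + k) % 2 ^ ws.length = k := by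
        rw [Nat.add_mod_left, Nat.mod_eq_of_lt hk]
      simp only [pvDecode]
      rw [hshift, PySem.Int.floordiv_natCast, PySem.Int.mod_natCast, hq, hr]
      simp
    simp only [pvProdR, ih, List.flatMap_cons, List.flatMap_nil,
      List.append_nil, List.map_map, Function.comp_def]
    rw [List.map_append]
    congr 1
    · exact (List.map_congr_left (fun k hk => (hd1 k (List.mem_range.mp hk)).symm))
    · rw [List.map_map]
      refine (List.map_congr_left (fun k hk => ?_))
      exact_mod_cast (hd2 k (List.mem_range.mp hk)).symm

-- ===== VERDICT (by name: the statement is the Claim_ definition above) =====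
theorem legal_term_variants_py_spec : Claim_equal_legal_term_variants_py := by
  intro term _
  unfold Spec_legal_term_variants_py legal_term_variants_py legal_term_variants_py_alt pyProduct
  simp only [List.foldl_map]
  have hpairs : ∀ t : String,
      [PySem.Str.join " " (t.toList.map (fun c => String.ofList [c])),
       PySem.Str.join "" (t.toList.map (fun c => String.ofList [c]))] = [pvSpaced t, t] := by
    intro t; rw [pvJoined_eq]; rfl
  simp only [hpairs]
  rw [show ∀ ws : List String,
      ws.foldl (fun acc t => acc.flatMap (fun p => [pvSpaced t, t].map (fun x => p ++ [x]))) [[]]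
        = pvProdR ws from fun ws => by rw [pvFold_prod]; simp,
    pvProdR_eq_decode]
  rw [PySem.List.pyRange_one]
  have h1 : ((1 : Int) <<< (PySem.Str.split₀ term).length - 0)
      = ((2 ^ (PySem.Str.split₀ term).length : Nat) : Int) := by
    simp [Int.shiftLeft_eq]
  rw [h1, Int.toNat_natCast]
  simp [List.map_map, Function.comp_def]
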